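-- pv_equiv track=rewrite | github.com/Zojax/zojax.wiki_ | src/zojax/wiki/format.py | generateWikiName
-- ===== SOURCE A (Python) =====
-- allowedChars = u'qwertyuiopasdfghjklzxcvbnmQWERTYUIOPASDFGHJKLZXCVBNM'
--
-- def generateWikiName(name):
--     _name = u''
--     for ch in name:
--         if ch not in allowedChars:
--             _name += ' '
--         else:
--             _name += ch
--
--     _name = _name.split(u' ')
--     if len(_name) > 1:
--         _name = [n.strip().capitalize() for n in _name]
--
--     return u''.join(_name)
-- ===== SOURCE B (Python) =====
-- allowedChars = u'qwertyuiopasdfghjklzxcvbnmQWERTYUIOPASDFGHJKLZXCVBNM'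
--
-- def generateWikiName(name):
--     # single pass: collect letter runs; a non-letter ends the current word
--     words = []
--     buf = []
--     had_separator = False
--     for ch in name:
--         if ch in allowedChars:
--             buf.append(ch)
--         else:
--             words.append(u''.join(buf))
--             buf = []
--             had_separator = True
--     words.append(u''.join(buf))
--     if had_separator:
--         words = [w.capitalize() for w in words]
--     return u''.join(words)
-- ===== Notes on version B (the rewrite author's own statement) =====
-- stated objective: alternative
-- what changed: B replaces A's three-pass pipeline (build a masked copy with non-letters turned into spaces, split it on ' ', then strip/capitalize and re-join) by a single pass over the characters that accumulates letter runs into a buffer, emits a word at each non-letter, and tracks a had_separator flag playing the role of A's len(split)>1 test.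
import Mathlib
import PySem

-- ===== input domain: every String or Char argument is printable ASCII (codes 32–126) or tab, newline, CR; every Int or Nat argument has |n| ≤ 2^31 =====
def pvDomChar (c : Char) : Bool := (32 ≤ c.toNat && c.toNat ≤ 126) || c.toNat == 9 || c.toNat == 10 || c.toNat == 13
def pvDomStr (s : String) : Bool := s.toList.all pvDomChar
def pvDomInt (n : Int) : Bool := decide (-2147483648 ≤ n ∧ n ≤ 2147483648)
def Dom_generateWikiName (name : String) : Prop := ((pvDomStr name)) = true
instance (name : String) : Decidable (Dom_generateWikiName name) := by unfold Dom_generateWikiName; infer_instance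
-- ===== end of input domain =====

-- B replaces A's replace/split/recombine pipeline by a single-pass tokenizer (objective: alternative decomposition).

-- shared module constant
def pvAllowed : List Char := "qwertyuiopasdfghjklzxcvbnmQWERTYUIOPASDFGHJKLZXCVBNM".toList

-- hand-port of Python str.capitalize (exact on the ASCII domain: first char upper, rest lower)
def pyCapitalize (s : List Char) : List Char :=
  match s with
  | [] => []
  | c :: rest => PySem.Chars.upperChar c :: PySem.Chars.lower rest

-- ===== PORT A =====
def generateWikiName (name : String) : String :=
  let n := name.toList.foldl
    (fun acc ch => if ch ∉ pvAllowed then acc ++ [' '] else acc ++ [ch]) []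
  let parts := PySem.Chars.splitOn n [' ']
  let parts := if 1 < parts.length
    then parts.map (fun p => pyCapitalize (PySem.Chars.strip p)) else parts
  String.ofList (PySem.Chars.join [] parts)

-- ===== PORT B =====
-- B's loop over the characters, carrying the current buffer; a word is emitted at each
-- separator, the final buffer at the end; the Bool is B's had_separator flag.
def bLoop : List Char → List Char → List (List Char) × Bool
  | [], buf => ([buf], false)
  | ch :: rest, buf =>
    if ch ∈ pvAllowed then bLoop rest (buf ++ [ch])
    else
      let r := bLoop rest []
      (buf :: r.1, true)

def generateWikiName_alt (name : String) : String :=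
  let r := bLoop name.toList []
  let words := if r.2 then r.1.map pyCapitalize else r.1
  String.ofList (PySem.Chars.join [] words)

-- ===== PRECONDITION & SPEC =====
def Spec_generateWikiName (name : String) (out : String) : Prop := out = generateWikiName_alt name
instance (name : String) (out : String) : Decidable (Spec_generateWikiName name out) := by unfold Spec_generateWikiName; infer_instance

-- ===== CLAIM (what is proved, stated in full; the proofs are below) =====
def Claim_equal_generateWikiName : Prop := ∀ (name : String), Dom_generateWikiName name → Spec_generateWikiName name (generateWikiName name)

-- ===== LEMMAS AND PROOFS =====

-- proof-only helpers
def pvMask (ch : Char) : Char := if ch ∈ pvAllowed then ch else ' '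

-- simple structural model of split(' ')
def pvSplitSp : List Char → List (List Char)
  | [] => [[]]
  | c :: t => if c = ' ' then [] :: pvSplitSp t else (pvSplitSp t).modifyHead (c :: ·)

lemma pvSplitSp_ne_nil (l : List Char) : pvSplitSp l ≠ [] := by
  induction l with
  | nil => simp [pvSplitSp]
  | cons c t ih =>
    simp only [pvSplitSp]
    split_ifs
    · simp
    · cases h : pvSplitSp t with
      | nil => exact absurd h ih
      | cons a b => simp [List.modifyHead]

lemma pvModifyHead_id {α : Type} (l : List α) : l.modifyHead (fun x => x) = l := by
  cases l <;> simp [List.modifyHead]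

lemma pvFoldA (cs : List Char) : ∀ acc : List Char,
    cs.foldl (fun acc ch => if ch ∉ pvAllowed then acc ++ [' '] else acc ++ [ch]) acc
      = acc ++ cs.map pvMask := by
  induction cs with
  | nil => simp
  | cons c t ih =>
    intro acc
    simp only [List.foldl, List.map]
    by_cases h : c ∈ pvAllowed
    · rw [if_neg (not_not_intro h), ih]
      simp [pvMask, h]
    · rw [if_pos h, ih]
      simp [pvMask, h]

lemma pvGo_spec (fuel : Nat) : ∀ l : List Char, l.length ≤ fuel → ∀ (cur : List Char) (acc : List (List Char)),
    PySem.Chars.splitOn.go [' '] fuel l cur acc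
      = acc.reverse ++ (pvSplitSp l).modifyHead (cur.reverse ++ ·) := by
  induction fuel with
  | zero =>
    intro l hl cur acc
    have : l = [] := List.eq_nil_of_length_eq_zero (Nat.le_zero.mp hl)
    subst this
    rw [PySem.Chars.splitOn.go]
    simp [pvSplitSp, List.modifyHead]
  | succ fuel ih =>
    intro l hl cur acc
    cases l with
    | nil =>
      rw [PySem.Chars.splitOn.go]
      simp [pvSplitSp, List.modifyHead]
      all_goals omega
    | cons c rest =>
      rw [PySem.Chars.splitOn.go]
      have hrest : rest.length ≤ fuel := by simpa using hl
      by_cases hc : c = ' '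
      · subst hc
        have hpre : [' '].isPrefixOf (' ' :: rest) = true := by simp [List.isPrefixOf]
        simp only [hpre, if_pos, List.length_singleton, List.drop_succ_cons, List.drop_zero]
        rw [ih rest hrest [] (List.reverse cur :: acc)]
        simp [pvSplitSp, pvModifyHead_id]
      · have hpre : [' '].isPrefixOf (c :: rest) = false := by
          simp [List.isPrefixOf]
          exact Ne.symm hc
        simp only [hpre, Bool.false_eq_true, if_false]
        rw [ih rest hrest (c :: cur) acc]
        simp only [pvSplitSp, hc, if_false, List.reverse_cons]
        cases h : pvSplitSp rest with
        | nil => exact absurd h (pvSplitSp_ne_nil rest)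
        | cons a b => simp [List.modifyHead]

lemma pvSplitOn_sp (l : List Char) :
    PySem.Chars.splitOn l [' '] = pvSplitSp l := by
  show PySem.Chars.splitOn.go [' '] (l.length + 1) l [] [] = _
  rw [pvGo_spec (l.length + 1) l (Nat.le_succ _) [] []]
  simp [pvModifyHead_id]

lemma pvBLoop_spec (cs : List Char) : ∀ buf : List Char,
    bLoop cs buf = ((pvSplitSp (cs.map pvMask)).modifyHead (buf ++ ·),
                    decide (1 < (pvSplitSp (cs.map pvMask)).length)) := by
  induction cs with
  | nil => intro buf; simp [bLoop, pvSplitSp, List.modifyHead]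
  | cons c t ih =>
    intro buf
    obtain ⟨a, b, hs⟩ : ∃ a b, pvSplitSp (t.map pvMask) = a :: b := by
      cases h : pvSplitSp (t.map pvMask) with
      | nil => exact absurd h (pvSplitSp_ne_nil _)
      | cons a b => exact ⟨a, b, rfl⟩
    by_cases h : c ∈ pvAllowed
    · have hmask : pvMask c = c := by simp [pvMask, h]
      have hcsp : ¬ c = ' ' := by
        intro hceq; rw [hceq] at h; revert h; decide
      simp only [bLoop, h, if_pos, List.map, hmask, pvSplitSp, hcsp, if_false, ih, hs]
      simp [List.modifyHead]
    · have hmask : pvMask c = ' ' := by simp [pvMask, h]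
      simp only [bLoop, h, if_false, List.map, hmask, pvSplitSp, if_pos, ih, hs]
      simp [List.modifyHead]

-- every char of a token of pvSplitSp l is a non-space char of l
lemma pvMem_splitSp (l : List Char) : ∀ x ∈ pvSplitSp l, ∀ c ∈ x, c ∈ l ∧ c ≠ ' ' := by
  induction l with
  | nil => simp [pvSplitSp]
  | cons a t ih =>
    intro x hx c hc
    by_cases ha : a = ' '
    · subst ha
      rw [pvSplitSp, if_pos rfl, List.mem_cons] at hx
      rcases hx with hx | hx
      · subst hx; simp at hc
      · exact ⟨List.mem_cons_of_mem _ (ih x hx c hc).1, (ih x hx c hc).2⟩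
    · rw [pvSplitSp, if_neg ha] at hx
      cases hs : pvSplitSp t with
      | nil => exact absurd hs (pvSplitSp_ne_nil t)
      | cons y ys =>
        rw [hs] at hx
        simp only [List.modifyHead, List.mem_cons] at hx
        rcases hx with hx | hx
        · subst hx
          rcases List.mem_cons.mp hc with hc | hc
          · subst hc; exact ⟨List.mem_cons_self, ha⟩
          · have := ih y (by rw [hs]; exact List.mem_cons_self) c hc
            exact ⟨List.mem_cons_of_mem _ this.1, this.2⟩
        · have := ih x (by rw [hs]; exact List.mem_cons_of_mem _ hx) c hc
          exact ⟨List.mem_cons_of_mem _ this.1, this.2⟩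

lemma pvStrip_of_no_space (s : List Char) (h : ∀ c ∈ s, PySem.Chars.isspace c = false) :
    PySem.Chars.strip s = s := by
  have hdw : ∀ t : List Char, (∀ c ∈ t, PySem.Chars.isspace c = false) →
      t.dropWhile PySem.Chars.isspace = t := by
    intro t ht
    cases t with
    | nil => rfl
    | cons a b => simp [List.dropWhile, ht a List.mem_cons_self]
  simp only [PySem.Chars.strip, PySem.Chars.lstrip, PySem.Chars.rstrip]
  rw [hdw s h, hdw s.reverse (by intro c hc; exact h c (List.mem_reverse.mp hc)), List.reverse_reverse]

lemma pvAllowed_not_space : ∀ c ∈ pvAllowed, PySem.Chars.isspace c = false := by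
  have h : pvAllowed.all (fun c => !PySem.Chars.isspace c) = true := by decide
  intro c hc
  simpa using List.all_eq_true.mp h c hc

-- tokens of the masked string survive strip unchanged
lemma pvStrip_token (cs : List Char) (x : List Char) (hx : x ∈ pvSplitSp (cs.map pvMask)) :
    PySem.Chars.strip x = x := by
  apply pvStrip_of_no_space
  intro c hc
  have h := pvMem_splitSp _ x hx c hc
  have hcm : c ∈ cs.map pvMask := h.1
  rcases List.mem_map.mp hcm with ⟨d, _, hd⟩
  by_cases hda : d ∈ pvAllowed
  · exact pvAllowed_not_space c (by rw [← hd]; simp [pvMask, hda])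
  · exact absurd (by rw [← hd]; simp [pvMask, hda]) h.2

-- ===== VERDICT (by name: the statement is the Claim_ definition above) =====
theorem generateWikiName_spec : Claim_equal_generateWikiName := by
  intro name _
  unfold Spec_generateWikiName generateWikiName generateWikiName_alt
  simp only [pvFoldA name.toList [], List.nil_append, pvSplitOn_sp,
    pvBLoop_spec name.toList [], pvModifyHead_id, List.nil_append, decide_eq_true_eq]
  by_cases h : 1 < (pvSplitSp (name.toList.map pvMask)).length
  · simp only [h, if_pos]
    congr 1
    congr 1
    apply List.map_congr_left
    intro x hx
    rw [pvStrip_token name.toList x hx]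
  · simp [h]
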